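-- pv_equiv track=rewrite | github.com/barteksmolkowski/adventofcode_2024 | bfs.py | bfs
-- ===== SOURCE A (Python) =====
-- tablica = [
--     [-1, 0, 0],
--     [0, 1, 0],
--     [0, 0, 2]
-- ]
--
-- def bfs(x, y):
--     def policz_sasiadow(x, y, zajete_pola):
--         ruchy = {1: (0, -1), 2: (1, 0), 3: (0, 1), 4: (-1, 0)}
--         indexy_sasiadow = []
--         for dx, dy in ruchy.values():
--             nx, ny = x + dx, y + dy
--             if 0 <= nx < len(tablica) and 0 <= ny < len(tablica[0]):  # Sprawdź czy w granicach
--                 if tablica[nx][ny] != 1 and (nx, ny) not in zajete_pola:  # Blokada lub już zajęte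
--                     indexy_sasiadow.append((nx, ny))
--         return indexy_sasiadow
--
--     # Inicjalizacja BFS
--     kolejka = [(x, y, [(x, y)])]  # Kolejka: (bieżący x, bieżący y, ścieżka)
--     licznik_sciezek = 0
--
--     while kolejka:
--         cx, cy, sciezka = kolejka.pop(0)
--
--         # Jeśli dotarliśmy do celu (wartość 2)
--         if tablica[cx][cy] == 2:
--             licznik_sciezek += 1
--             continue
--
--         # Znajdź sąsiadów i dodaj do kolejki
--         sasiedzi = policz_sasiadow(cx, cy, sciezka)
--         for nx, ny in sasiedzi:
--             kolejka.append((nx, ny, sciezka + [(nx, ny)]))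
--
--     return licznik_sciezek
-- ===== SOURCE B (Python) =====
-- # Recursive DFS path-count instead of A's BFS queue of explicit paths (same result, no path lists kept).
-- tablica = [
--     [-1, 0, 0],
--     [0, 1, 0],
--     [0, 0, 2]
-- ]
--
-- def bfs(x, y):
--     def count(cx, cy, visited):
--         if tablica[cx][cy] == 2:
--             return 1
--         total = 0
--         for dx, dy in ((0, -1), (1, 0), (0, 1), (-1, 0)):
--             nx, ny = cx + dx, cy + dy
--             if 0 <= nx < 3 and 0 <= ny < 3 and tablica[nx][ny] != 1 and (nx, ny) not in visited:
--                 total += count(nx, ny, visited | {(nx, ny)})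
--         return total
--     return count(x, y, frozenset({(x, y)}))
-- ===== Notes on version B (the rewrite author's own statement) =====
-- stated objective: simpler
-- what changed: Replaces the BFS over a queue of (cell, full-path-list) triples with a direct recursive DFS that returns 1 at the target and otherwise sums the counts of the four unvisited in-bounds non-wall neighbours, so no queue and no path lists are ever built.
import Mathlib
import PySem

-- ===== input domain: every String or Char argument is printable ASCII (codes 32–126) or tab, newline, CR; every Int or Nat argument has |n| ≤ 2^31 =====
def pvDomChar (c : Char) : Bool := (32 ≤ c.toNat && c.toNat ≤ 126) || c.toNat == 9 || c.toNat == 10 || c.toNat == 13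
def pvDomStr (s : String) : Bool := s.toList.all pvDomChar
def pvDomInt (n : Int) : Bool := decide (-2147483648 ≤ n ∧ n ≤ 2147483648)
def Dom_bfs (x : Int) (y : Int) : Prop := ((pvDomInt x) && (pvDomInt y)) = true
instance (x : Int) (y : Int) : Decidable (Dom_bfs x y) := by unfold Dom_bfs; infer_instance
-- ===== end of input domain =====

-- B replaces A's BFS over a queue of explicit paths by a recursive DFS that sums path counts (simpler, no path lists kept); return values proved equal on all starts Python accepts.

-- ===== PORT A =====

def tablicaA : List (List Int) := [[-1, 0, 0], [0, 1, 0], [0, 0, 2]]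

-- tablica[i][j] with Python indexing; the default 0 is never reached under Pre_bfs
def cellA (i j : Int) : Int :=
  ((PySem.List.pyGet? tablicaA i).getD []) |> fun row => (PySem.List.pyGet? row j).getD 0

def policz_sasiadow (x y : Int) (zajete_pola : List (Int × Int)) : List (Int × Int) :=
  [((0 : Int), (-1 : Int)), (1, 0), (0, 1), (-1, 0)].foldl
    (fun acc d =>
      let nx := x + d.1
      let ny := y + d.2
      if 0 ≤ nx ∧ nx < 3 ∧ 0 ≤ ny ∧ ny < 3 ∧ cellA nx ny ≠ 1 ∧ (nx, ny) ∉ zajete_pola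
      then acc ++ [(nx, ny)] else acc) []

-- the while-loop over the queue; fuel bounds the number of pops (≤ 37 on every admitted input, 64 is never exhausted there)
def bfsLoop : Nat → List (Int × Int × List (Int × Int)) → Int → Int
  | 0, _, licznik => licznik
  | _ + 1, [], licznik => licznik
  | fuel + 1, (cx, cy, sciezka) :: rest, licznik =>
    if cellA cx cy = 2 then bfsLoop fuel rest (licznik + 1)
    else
      bfsLoop fuel
        (rest ++ (policz_sasiadow cx cy sciezka).map (fun p => (p.1, p.2, sciezka ++ [p])))
        licznik

def bfs (x : Int) (y : Int) : Int := bfsLoop 64 [(x, y, [(x, y)])] 0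

-- ===== PORT B =====

def tablicaB : List (List Int) := [[-1, 0, 0], [0, 1, 0], [0, 0, 2]]

def cellB (i j : Int) : Int :=
  ((PySem.List.pyGet? tablicaB i).getD []) |> fun row => (PySem.List.pyGet? row j).getD 0

-- recursive DFS count; fuel bounds recursion depth (≤ 10 on every admitted input, 16 is never exhausted there)
def countDfs : Nat → Int → Int → PySem.Set (Int × Int) → Int
  | 0, _, _, _ => 0
  | fuel + 1, cx, cy, visited =>
    if cellB cx cy = 2 then 1
    else
      [((0 : Int), (-1 : Int)), (1, 0), (0, 1), (-1, 0)].foldl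
        (fun total d =>
          let nx := cx + d.1
          let ny := cy + d.2
          if 0 ≤ nx ∧ nx < 3 ∧ 0 ≤ ny ∧ ny < 3 ∧ cellB nx ny ≠ 1 ∧ ¬ PySem.Set.contains visited (nx, ny)
          then total + countDfs fuel nx ny (PySem.Set.add visited (nx, ny)) else total) 0

def bfs_alt (x : Int) (y : Int) : Int :=
  countDfs 16 x y (PySem.Set.ofList [(x, y)])

-- ===== PRECONDITION & SPEC =====
-- Pre_ excludes exactly the starts where Python's tablica[x][y] raises IndexError (|index| beyond the 3×3 grid); both A and B raise there.
def Pre_bfs (x : Int) (y : Int) : Prop := -3 ≤ x ∧ x < 3 ∧ -3 ≤ y ∧ y < 3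
instance (x : Int) (y : Int) : Decidable (Pre_bfs x y) := by unfold Pre_bfs; infer_instance
def pvWitness_bfs : Int × Int := (0, 0)

def Spec_bfs (x : Int) (y : Int) (out : Int) : Prop := out = bfs_alt x y
instance (x : Int) (y : Int) (out : Int) : Decidable (Spec_bfs x y out) := by unfold Spec_bfs; infer_instance

-- ===== CLAIM (what is proved, stated in full; the proofs are below) =====
def Claim_equal_bfs : Prop := ∀ (x : Int) (y : Int), Dom_bfs x y → Pre_bfs x y → Spec_bfs x y (bfs x y)

-- ===== LEMMAS AND PROOFS =====

-- ===== VERDICT (by name: the statement is the Claim_ definition above) =====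
theorem bfs_spec : Claim_equal_bfs := by
  unfold Claim_equal_bfs
  intro x y _ hpre
  obtain ⟨h1, h2, h3, h4⟩ := hpre
  unfold Spec_bfs
  interval_cases x <;> interval_cases y <;> decide
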